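-- pv_equiv track=rewrite | github.com/jahongir1511/8-5dars | 8,5dars/main4.py | repeat_sum
-- ===== SOURCE A (Python) =====
-- def repeat_sum(lists):
--     num_count = {}
--
--     for sublist in lists:
--         seen = set()
--         for num in sublist:
--             if num not in seen:
--                 num_count[num] = num_count.get(num, 0) + 1
--                 seen.add(num)
--
--     repeated_numbers = [num for num, count in num_count.items() if count >= 2]
--     total_sum = sum(repeated_numbers)
--
--     return total_sum
-- ===== SOURCE B (Python) =====
-- def repeat_sum(lists):
--     pool = sorted(x for sub in lists for x in set(sub))
--     total = 0
--     prev = None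
--     counted = False
--     for x in pool:
--         if x == prev:
--             if not counted:
--                 total += x
--                 counted = True
--         else:
--             prev = x
--             counted = False
--     return total
-- ===== Notes on version B (the rewrite author's own statement) =====
-- stated objective: alternative
-- what changed: Replaces the cross-sublist count dictionary and its final filtering pass with a sort-then-scan: all per-sublist-deduplicated elements are flattened into one pool, sorted, and a single adjacent-duplicate scan sums each value that forms a run of length >= 2.
import Mathlib
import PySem

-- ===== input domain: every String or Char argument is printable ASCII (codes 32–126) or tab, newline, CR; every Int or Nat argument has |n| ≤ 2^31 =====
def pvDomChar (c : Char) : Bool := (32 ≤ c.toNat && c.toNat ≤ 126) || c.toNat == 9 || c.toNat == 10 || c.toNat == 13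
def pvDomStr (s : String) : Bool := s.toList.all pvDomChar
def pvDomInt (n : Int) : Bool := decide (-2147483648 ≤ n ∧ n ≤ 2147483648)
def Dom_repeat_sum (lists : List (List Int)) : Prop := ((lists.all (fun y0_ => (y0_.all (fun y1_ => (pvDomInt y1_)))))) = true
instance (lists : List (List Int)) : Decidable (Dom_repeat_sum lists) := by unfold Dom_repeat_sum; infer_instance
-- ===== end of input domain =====

-- B replaces A's cross-sublist count dictionary (and its final filtering pass over dict items) with a
-- sort-then-scan: flatten the per-sublist-deduplicated elements, sort them, and sum each run of length >= 2 once.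


-- ===== PORT A =====
-- inner loop body: "if num not in seen: num_count[num] = num_count.get(num, 0) + 1; seen.add(num)"
def repeatSumInnerA (st : PySem.Dict Int Int × PySem.Set Int) (num : Int) :
    PySem.Dict Int Int × PySem.Set Int :=
  if num ∉ st.2 then (st.1.insert num (st.1.getD num 0 + 1), PySem.Set.add st.2 num) else st

def repeat_sum (lists : List (List Int)) : Int :=
  let num_count : PySem.Dict Int Int :=
    lists.foldl (fun num_count sublist =>
      (sublist.foldl repeatSumInnerA (num_count, PySem.Set.empty)).1) PySem.Dict.empty
  let repeated_numbers : List Int :=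
    (num_count.items.filter (fun p => decide (2 ≤ p.2))).map Prod.fst
  repeated_numbers.sum

-- ===== PORT B =====
-- loop body of Source B's scan over the sorted pool; state = (total, prev, counted).
-- "if x == prev: (if not counted: total += x; counted = True)  else: prev = x; counted = False"
def scanStep (st : Int × Option Int × Bool) (x : Int) : Int × Option Int × Bool :=
  if st.2.1 = some x then (if st.2.2 then st else (st.1 + x, st.2.1, true))
  else (st.1, some x, false)

-- pool = sorted(x for sub in lists for x in set(sub)); Python's set iteration order is
-- arbitrary but irrelevant here because the pool is sorted immediately (exact).
def repeat_sum_alt (lists : List (List Int)) : Int :=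
  let pool : List Int :=
    PySem.List.sorted (lists.flatMap (fun sub => PySem.Set.ofList sub)) (fun x => x) false
  (pool.foldl scanStep (0, none, false)).1

-- ===== PRECONDITION & SPEC =====
def Spec_repeat_sum (lists : List (List Int)) (out : Int) : Prop := out = repeat_sum_alt lists
instance (lists : List (List Int)) (out : Int) : Decidable (Spec_repeat_sum lists out) := by unfold Spec_repeat_sum; infer_instance

-- ===== CLAIM (what is proved, stated in full; the proofs are below) =====
def Claim_equal_repeat_sum : Prop := ∀ (lists : List (List Int)), Dom_repeat_sum lists → Spec_repeat_sum lists (repeat_sum lists)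

-- ===== LEMMAS AND PROOFS =====

-- number of sublists of `lists` containing n (each sublist counted at most once, as both programs do)
def occCount (lists : List (List Int)) (n : Int) : Nat :=
  lists.countP (fun s => decide (n ∈ s))

-- sum of the distinct values of m that occur at least twice in m
def runSum (m : List Int) : Int :=
  ∑ x ∈ m.toFinset, if 2 ≤ m.count x then x else 0

-- ---- A side ----

theorem innerA_getD (sub : List Int) (d : PySem.Dict Int Int) (seen : PySem.Set Int) (n : Int) :
    (sub.foldl repeatSumInnerA (d, seen)).1.getD n 0
      = d.getD n 0 + (if n ∈ sub ∧ n ∉ seen then 1 else 0) := by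
  induction sub generalizing d seen with
  | nil => simp
  | cons a sub ih =>
    simp only [List.foldl_cons, repeatSumInnerA]
    by_cases ha : a ∈ seen
    · simp only [ha, not_true_eq_false, if_neg, not_false_eq_true]
      rw [ih]
      by_cases hn : n = a
      · subst hn; simp [ha]
      · simp [List.mem_cons, hn]
    · simp only [ha, not_false_eq_true, if_pos]
      rw [ih]
      by_cases hn : n = a
      · subst hn
        simp [PySem.Dict.getD_insert_self, ha]
      · rw [PySem.Dict.getD_insert_of_ne (hne := hn)]
        have : (n ∈ PySem.Set.add seen a) ↔ n ∈ seen := by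
          simp [PySem.Set.mem_add, hn]
        simp [List.mem_cons, hn, this]

theorem innerA_nodup (sub : List Int) (d : PySem.Dict Int Int) (seen : PySem.Set Int)
    (h : d.keys.Nodup) : (sub.foldl repeatSumInnerA (d, seen)).1.keys.Nodup := by
  induction sub generalizing d seen with
  | nil => exact h
  | cons a sub ih =>
    simp only [List.foldl_cons, repeatSumInnerA]
    by_cases ha : a ∈ seen
    · simp only [ha, not_true_eq_false, ite_false]; exact ih d seen h
    · simp only [ha, not_false_eq_true, ite_true]
      exact ih _ _ (PySem.Dict.nodup_keys_insert _ _ _ h)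

theorem outerA (lists : List (List Int)) :
    ∀ (d : PySem.Dict Int Int), d.keys.Nodup →
    (∀ n, (lists.foldl (fun num_count sublist =>
        (sublist.foldl repeatSumInnerA (num_count, PySem.Set.empty)).1) d).getD n 0
          = d.getD n 0 + (occCount lists n : Int)) ∧
    (lists.foldl (fun num_count sublist =>
        (sublist.foldl repeatSumInnerA (num_count, PySem.Set.empty)).1) d).keys.Nodup := by
  induction lists with
  | nil => intro d hk; simp [occCount, hk]
  | cons sub rest ih =>
    intro d hk
    simp only [List.foldl_cons]
    obtain ⟨h1, h2⟩ := ih _ (innerA_nodup sub d PySem.Set.empty hk)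
    refine ⟨fun n => ?_, h2⟩
    rw [h1 n, innerA_getD]
    have hocc : occCount (sub :: rest) n
        = occCount rest n + (if n ∈ sub then 1 else 0) := by
      simp [occCount, List.countP_cons]
    rw [hocc]
    by_cases hns : n ∈ sub
    · simp [hns, PySem.Set.empty]; ring
    · simp [hns]

-- ---- B side ----

-- extracting the minimal element's run from runSum (no sortedness needed)
theorem runSum_cons (b : Int) (xs : List Int) :
    runSum (b :: xs) = (if b ∈ xs then b else 0) + runSum (xs.filter (fun x => decide (x ≠ b))) := by
  unfold runSum
  have h1 : (b :: xs).toFinset = insert b (xs.toFinset.erase b) := by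
    ext x
    by_cases hx : x = b <;> simp [hx]
  rw [h1, Finset.sum_insert (by simp)]
  have hfb : (if 2 ≤ (b :: xs).count b then b else 0) = (if b ∈ xs then b else 0) := by
    rw [List.count_cons_self]
    by_cases hb : b ∈ xs
    · have h1 := List.count_pos_iff.mpr hb
      have h2 : 2 ≤ xs.count b + 1 := by omega
      simp [hb, h2]
    · have h0 : xs.count b = 0 := List.count_eq_zero.mpr hb
      simp [hb, h0]
  have hfs : (xs.filter (fun x => decide (x ≠ b))).toFinset = xs.toFinset.erase b := by
    ext x
    by_cases hx : x = b <;> simp [hx]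
  rw [hfb, hfs]
  congr 1
  refine Finset.sum_congr rfl fun x hx => ?_
  have hxb : x ≠ b := (Finset.mem_erase.mp hx).1
  have hc1 : (b :: xs).count x = xs.count x := by
    simp [Ne.symm hxb]
  have hc2 : (xs.filter (fun x => decide (x ≠ b))).count x = xs.count x := by
    rw [List.count_filter]
    simp [hxb]
  rw [hc1, hc2]

-- when a is strictly below everything, filtering a away does nothing
theorem filter_ne_eq_self (a : Int) (l : List Int) (h : a ∉ l) :
    l.filter (fun x => decide (x ≠ a)) = l := by
  refine List.filter_eq_self.mpr fun x hx => ?_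
  have : x ≠ a := fun he => h (he ▸ hx)
  simp [this]

-- B's scan over a sorted tail: prev = a, everything in l is ≥ a
theorem scan_run (l : List Int) (hp : l.Pairwise (· ≤ ·)) :
    ∀ (t a : Int) (c : Bool), (∀ x ∈ l, a ≤ x) →
    (l.foldl scanStep (t, some a, c)).1
      = t + (if c = false ∧ a ∈ l then a else 0) + runSum (l.filter (fun x => decide (x ≠ a))) := by
  induction l with
  | nil => intro t a c _; simp [runSum]
  | cons b l ih =>
    intro t a c hge
    have hab : a ≤ b := hge b (List.mem_cons_self)
    have hpl : l.Pairwise (· ≤ ·) := hp.of_cons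
    have hbl : ∀ x ∈ l, b ≤ x := fun x hx => (List.pairwise_cons.mp hp).1 x hx
    simp only [List.foldl_cons, scanStep]
    by_cases hba : a = b
    · subst hba
      have hfilter : (a :: l).filter (fun x => decide (x ≠ a)) = l.filter (fun x => decide (x ≠ a)) := by
        simp
      cases c with
      | true =>
        simp only [ite_true]
        rw [ih hpl t a true hbl, hfilter]
        simp
      | false =>
        simp only [Bool.false_eq_true, ite_false, if_true]
        rw [ih hpl (t + a) a true hbl, hfilter]
        simp
    · have hsome : ¬ (some a = some b) := by simp [hba]
      simp only [hsome, ite_false]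
      rw [ih hpl t b false hbl]
      have halt : a < b := lt_of_le_of_ne hab hba
      have hanl : a ∉ l := fun hmem => absurd (hbl a hmem) (by omega)
      have hacons : a ∉ b :: l := by
        simp [List.mem_cons, hba, hanl]
      have hfc : (b :: l).filter (fun x => decide (x ≠ a)) = b :: l := by
        refine filter_ne_eq_self a (b :: l) hacons
      rw [hfc, runSum_cons]
      simp [hacons]; ring

-- B computes runSum of the sorted pool
theorem scan_eq_runSum (pool : List Int) (hp : pool.Pairwise (· ≤ ·)) :
    (pool.foldl scanStep (0, none, false)).1 = runSum pool := by
  cases pool with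
  | nil => simp [runSum]
  | cons a rest =>
    have hrest : rest.Pairwise (· ≤ ·) := hp.of_cons
    have hge : ∀ x ∈ rest, a ≤ x := fun x hx => (List.pairwise_cons.mp hp).1 x hx
    simp only [List.foldl_cons, scanStep]
    simp only [reduceCtorEq, ite_false]
    rw [scan_run rest hrest 0 a false hge, runSum_cons]
    simp

-- count of n in the flattened deduplicated pool = occCount
theorem count_flat (lists : List (List Int)) (n : Int) :
    (lists.flatMap (fun sub => PySem.Set.ofList sub)).count n = occCount lists n := by
  induction lists with
  | nil => simp [occCount]
  | cons sub rest ih =>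
    simp only [List.flatMap_cons, List.count_append, occCount, List.countP_cons]
    have hset : (PySem.Set.ofList sub).count n = if n ∈ sub then 1 else 0 := by
      rw [List.Nodup.count (PySem.Set.nodup_ofList sub)]
      simp [PySem.Set.mem_ofList]
    rw [hset]
    unfold occCount at ih
    by_cases hns : n ∈ sub
    · simp [hns, ih]; omega
    · simp [hns, ih]

-- ===== VERDICT (by name: the statement is the Claim_ definition above) =====
theorem repeat_sum_spec : Claim_equal_repeat_sum := by
  intro lists _
  unfold Spec_repeat_sum repeat_sum repeat_sum_alt
  simp only []
  set D := lists.foldl (fun num_count sublist =>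
      (sublist.foldl repeatSumInnerA (num_count, PySem.Set.empty)).1) PySem.Dict.empty with hD
  set pool := PySem.List.sorted (lists.flatMap (fun sub => PySem.Set.ofList sub)) (fun x => x) false
    with hpool
  -- pool facts
  have hperm : pool.Perm (lists.flatMap (fun sub => PySem.Set.ofList sub)) :=
    PySem.List.sorted_perm _ _ _
  have hcount : ∀ n, pool.count n = occCount lists n := by
    intro n; rw [hperm.count_eq, count_flat]
  have hsortpw : pool.Pairwise (· ≤ ·) := PySem.List.sorted_pairwise _ _
  -- B = runSum pool
  rw [scan_eq_runSum pool hsortpw]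
  -- A-side characterisation
  obtain ⟨hAg, hAk⟩ := outerA lists PySem.Dict.empty PySem.Dict.nodup_keys_empty
  have hDg : ∀ n, D.getD n 0 = (occCount lists n : Int) := by
    intro n; rw [hD, hAg n, PySem.Dict.getD_empty]; ring
  have hLA : ∀ n, n ∈ ((D.items.filter (fun p => decide (2 ≤ p.2))).map Prod.fst)
      ↔ 2 ≤ occCount lists n := by
    intro n
    constructor
    · intro hmem
      obtain ⟨⟨k, c⟩, hp, rfl⟩ := List.mem_map.mp hmem
      obtain ⟨hpi, hpc⟩ := List.mem_filter.mp hp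
      have h2 : (2 : Int) ≤ c := of_decide_eq_true hpc
      have := PySem.Dict.getD_of_mem_items D hpi hAk 0
      rw [hDg k] at this
      show 2 ≤ occCount lists k
      omega
    · intro hocc
      have hpos : D.getD n 0 = (occCount lists n : Int) := hDg n
      cases hq : D.get? n with
      | none =>
        have := PySem.Dict.getD_of_get?_eq_none D 0 hq
        rw [hpos] at this; omega
      | some c =>
        have hc : D.getD n 0 = c := PySem.Dict.getD_of_get?_eq_some D 0 hq
        have hci : (2 : Int) ≤ c := by rw [← hc, hpos]; exact_mod_cast hocc
        refine List.mem_map.mpr ⟨(n, c), List.mem_filter.mpr ⟨?_, ?_⟩, rfl⟩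
        · exact PySem.Dict.mem_items_of_get?_eq_some D hq
        · exact decide_eq_true hci
  have hLAnodup : ((D.items.filter (fun p => decide (2 ≤ p.2))).map Prod.fst).Nodup := by
    have hsub : ((D.items.filter (fun p => decide (2 ≤ p.2))).map Prod.fst).Sublist D.keys := by
      simp only [PySem.Dict.keys]
      exact List.Sublist.map _ List.filter_sublist
    exact hAk.sublist hsub
  -- sum A = Finset sum over its toFinset
  set L := (D.items.filter (fun p => decide (2 ≤ p.2))).map Prod.fst with hL
  have hsumA : L.sum = ∑ x ∈ L.toFinset, x := by
    rw [List.sum_toFinset _ hLAnodup]; simp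
  rw [hsumA]
  -- identify the two Finset sums
  unfold runSum
  rw [← Finset.sum_filter (fun x => 2 ≤ pool.count x) (fun x => x)]
  have hfin : L.toFinset = pool.toFinset.filter (fun x => 2 ≤ pool.count x) := by
    ext x
    simp only [List.mem_toFinset, Finset.mem_filter, hcount x, hLA x]
    have hmem : x ∈ pool ↔ 0 < occCount lists x := by
      rw [← hcount x]; exact List.count_pos_iff.symm
    rw [hmem]
    constructor
    · intro h; exact ⟨by omega, h⟩
    · intro h; exact h.2
  rw [hfin]
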